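-- pv_equiv track=rewrite | github.com/Benjamin-Chong/30-Days-of-python | day_14/Exercise2.py | starting_letters
-- ===== SOURCE A (Python) =====
-- def starting_letters(lst = None):
--     if lst == None:
--         lst = []
--         return 'There are no items to sort.'
--     starting_dict = {}
--     for country in lst:
--         if country[0] in starting_dict:
--             starting_dict[country[0]] += 1
--         else:
--             starting_dict[country[0]] = 1
--     return starting_dict
-- ===== SOURCE B (Python) =====
-- def starting_letters(lst = None):
--     if lst == None:
--         return 'There are no items to sort.'
--     firsts = [country[0] for country in lst]
--     return {ch: firsts.count(ch) for ch in dict.fromkeys(firsts)}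
-- ===== Notes on version B (the rewrite author's own statement) =====
-- stated objective: idiomatic
-- what changed: B extracts the first letters once and builds the frequency dict by counting each distinct letter (ordered dedup via dict.fromkeys + list.count) instead of A's element-by-element increment of a running counter dict.
-- outside the precondition, e.g. on starting_letters(None): A returns 'There are no items to sort.', B returns 'There are no items to sort.'
import Mathlib
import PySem

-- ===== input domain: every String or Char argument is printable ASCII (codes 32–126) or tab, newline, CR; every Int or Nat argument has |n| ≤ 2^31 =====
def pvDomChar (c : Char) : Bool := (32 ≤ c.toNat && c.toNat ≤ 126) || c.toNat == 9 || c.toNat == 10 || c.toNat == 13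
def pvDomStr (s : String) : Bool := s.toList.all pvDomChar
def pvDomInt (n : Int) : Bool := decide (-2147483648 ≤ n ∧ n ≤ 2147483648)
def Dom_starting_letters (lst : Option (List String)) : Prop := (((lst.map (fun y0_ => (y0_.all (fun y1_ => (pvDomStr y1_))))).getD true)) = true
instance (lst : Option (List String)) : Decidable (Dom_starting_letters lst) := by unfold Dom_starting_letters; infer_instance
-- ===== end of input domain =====

-- B builds the frequency dict by counting each distinct first letter (ordered dedup + count)
-- instead of A's element-by-element increment of a running counter dict (objective: idiomatic; return value only).


-- first letter of a string as a 1-char string (country[0]); "" only outside Pre_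
def pvFirst (s : String) : String := ((PySem.Str.pyGet? s 0).map (fun c => String.ofList [c])).getD ""

-- ===== PORT A =====
def starting_letters (lst : Option (List String)) : List (String × Int) :=
  match lst with
  | none => []   -- A returns the sentinel string 'There are no items to sort.' here (not a dict); excluded by Pre_
  | some l =>
    (l.foldl (fun d country =>
        let key := pvFirst country
        if d.contains key then d.insert key (d.getD key 0 + 1)
        else d.insert key 1)
      PySem.Dict.empty).items

-- ===== PORT B =====
def starting_letters_alt (lst : Option (List String)) : List (String × Int) :=
  match lst with
  | none => []   -- B returns the same sentinel string here; excluded by Pre_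
  | some l =>
    let firsts := l.map pvFirst
    (PySem.List.dedup firsts).map (fun ch => (ch, (PySem.List.count firsts ch : Int)))

-- ===== PRECONDITION & SPEC =====
-- Pre_ excludes lst = None (A returns the sentinel string, not a dict of the declared type)
-- and lists containing an empty string (country[0] raises IndexError).
def Pre_starting_letters (lst : Option (List String)) : Prop :=
  lst ≠ none ∧ "" ∉ lst.getD []
instance (lst : Option (List String)) : Decidable (Pre_starting_letters lst) := by unfold Pre_starting_letters; infer_instance
def pvWitness_starting_letters : Option (List String) := some ["Peru", "Chile", "China"]

def Spec_starting_letters (lst : Option (List String)) (out : List (String × Int)) : Prop := out = starting_letters_alt lst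
instance (lst : Option (List String)) (out : List (String × Int)) : Decidable (Spec_starting_letters lst out) := by unfold Spec_starting_letters; infer_instance

-- ===== CLAIM (what is proved, stated in full; the proofs are below) =====
def Claim_equal_starting_letters : Prop := ∀ (lst : Option (List String)), Dom_starting_letters lst → Pre_starting_letters lst → Spec_starting_letters lst (starting_letters lst)

-- ===== LEMMAS AND PROOFS =====

-- A's two branches collapse: when the key is absent, getD is 0, so 'insert key 1' = 'insert key (getD+1)'.
theorem pv_step_collapse {κ : Type} [BEq κ] [LawfulBEq κ] (d : PySem.Dict κ Int) (k : κ) :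
    (if d.contains k then d.insert k (d.getD k 0 + 1) else d.insert k 1)
      = d.insert k (d.getD k 0 + 1) := by
  by_cases h : d.contains k = true
  · simp [h]
  · simp [eq_false_of_ne_true h, PySem.Dict.getD_of_not_contains]

-- the loop over countries keyed by first letter is the counter loop over the list of first letters
theorem pv_foldl_key (l : List String) (d : PySem.Dict String Int) :
    l.foldl (fun d c => d.insert (pvFirst c) (d.getD (pvFirst c) 0 + 1)) d
      = (l.map pvFirst).foldl (fun d x => d.insert x (d.getD x 0 + 1)) d := by
  induction l generalizing d with
  | nil => rfl
  | cons c l ih => simp [List.foldl_cons, ih]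

-- ===== VERDICT (by name: the statement is the Claim_ definition above) =====
theorem starting_letters_spec : Claim_equal_starting_letters := by
  intro lst _ hpre
  obtain ⟨hne, -⟩ := hpre
  match lst with
  | none => exact absurd rfl hne
  | some l =>
    unfold Spec_starting_letters starting_letters starting_letters_alt
    simp only [funext (fun d => funext (fun c => pv_step_collapse d (pvFirst c)))]
    rw [pv_foldl_key, PySem.Dict.foldl_insert_getD_add_one_eq_counter, PySem.Dict.items_counter]
    simp [PySem.List.count_eq]
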